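-- pv_equiv track=rewrite | github.com/mathom/xrayvision | xrayvision/trace.py | parse_trace_info
-- ===== SOURCE A (Python) =====
-- def parse_trace_info(trace_value):
--     '''Parse the keys out of an xray trace string and return (root, parent, sampled) tuple.'''
--     trace_root = None
--     trace_parent = None
--     sampled = None
--
--     if trace_value:
--         for entry in trace_value.split(';'):
--             key, val = entry.split('=')
--             if key == 'Sampled':
--                 sampled = val
--             elif key == 'Root':
--                 trace_root = val
--             elif key == 'Parent':
--                 trace_parent = val
--
--     return (trace_root, trace_parent, sampled)
-- ===== SOURCE B (Python) =====
-- def parse_trace_info(trace_value):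
--     '''Parse the keys out of an xray trace string and return (root, parent, sampled) tuple.'''
--     entries = trace_value.split(';') if trace_value else []
--
--     def last_value(key):
--         for entry in reversed(entries):
--             k, v = entry.split('=')
--             if k == key:
--                 return v
--         return None
--
--     return (last_value('Root'), last_value('Parent'), last_value('Sampled'))
-- ===== Notes on version B (the rewrite author's own statement) =====
-- stated objective: alternative
-- what changed: Replaces A's single forward pass with if/elif accumulators by three staged backward searches: for each of the three keys, scan the entries in reverse and return the first (i.e. last-wins) matching value, with early exit.
import Mathlib
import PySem

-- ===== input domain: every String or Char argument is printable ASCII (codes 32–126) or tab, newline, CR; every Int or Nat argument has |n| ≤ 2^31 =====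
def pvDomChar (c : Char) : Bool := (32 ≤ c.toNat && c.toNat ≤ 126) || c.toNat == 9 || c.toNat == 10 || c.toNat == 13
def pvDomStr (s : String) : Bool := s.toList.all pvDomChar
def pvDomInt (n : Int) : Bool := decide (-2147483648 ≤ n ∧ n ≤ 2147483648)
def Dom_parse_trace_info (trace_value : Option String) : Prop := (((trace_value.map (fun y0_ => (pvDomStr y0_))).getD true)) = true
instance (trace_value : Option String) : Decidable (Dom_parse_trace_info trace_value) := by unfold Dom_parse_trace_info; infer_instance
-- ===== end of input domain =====

-- B replaces A's forward fold with if/elif accumulators by three per-key backward searches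
-- (first match in reverse = last wins), an alternative of the same cost.

-- ===== PORT A =====
-- s.split(sep) for a non-empty literal separator (split? is some there)
def pvSplit (s sep : String) : List String := (PySem.Str.split? s sep).getD []

-- one loop step of A: split the entry at '=' and update the matching accumulator
def pvStepA (st : Option String × Option String × Option String) (entry : String) :
    Option String × Option String × Option String :=
  match pvSplit entry "=" with
  | [key, val] =>
      if key = "Sampled" then (st.1, st.2.1, some val)
      else if key = "Root" then (some val, st.2.1, st.2.2)
      else if key = "Parent" then (st.1, some val, st.2.2)
      else st
  | _ => st    -- Python raises ValueError here (unpacking); excluded by Pre_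

def parse_trace_info (trace_value : Option String) : Option String × Option String × Option String :=
  match trace_value with
  | none => (none, none, none)
  | some s =>
      if s = "" then (none, none, none)
      else (pvSplit s ";").foldl pvStepA (none, none, none)

-- ===== PORT B =====
-- one reverse-scan step of B: split the entry at '=' and return its value iff the key matches
def pvMatchKV (key entry : String) : Option String :=
  match pvSplit entry "=" with
  | [k, v] => if k = key then some v else none
  | _ => none    -- Python raises ValueError here (unpacking); excluded by Pre_

-- B's last_value: first match over the reversed entry list (early exit = findSome?)
def pvLastValue (entries : List String) (key : String) : Option String :=
  entries.reverse.findSome? (pvMatchKV key)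

def parse_trace_info_alt (trace_value : Option String) : Option String × Option String × Option String :=
  match trace_value with
  | none => (none, none, none)
  | some s =>
      if s = "" then (none, none, none)
      else
        let entries := pvSplit s ";"
        (pvLastValue entries "Root", pvLastValue entries "Parent", pvLastValue entries "Sampled")

-- ===== PRECONDITION & SPEC =====
-- Pre_ excludes exactly the inputs where both Pythons raise ValueError: a non-empty string containing
-- an entry that does not split at '=' into exactly two parts.
def Pre_parse_trace_info (trace_value : Option String) : Prop :=
  (match trace_value with
   | none => true
   | some s => s == "" || (pvSplit s ";").all (fun e => (pvSplit e "=").length == 2)) = true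
instance (trace_value : Option String) : Decidable (Pre_parse_trace_info trace_value) := by unfold Pre_parse_trace_info; infer_instance

def pvWitness_parse_trace_info : Option String := some "Root=1-5759e988-bd862e3fe1be46a994272793;Parent=53995c3f42cd8ad8;Sampled=1"

def Spec_parse_trace_info (trace_value : Option String) (out : Option String × Option String × Option String) : Prop := out = parse_trace_info_alt trace_value
instance (trace_value : Option String) (out : Option String × Option String × Option String) : Decidable (Spec_parse_trace_info trace_value out) := by unfold Spec_parse_trace_info; infer_instance

-- ===== CLAIM (what is proved, stated in full; the proofs are below) =====
def Claim_equal_parse_trace_info : Prop := ∀ (trace_value : Option String), Dom_parse_trace_info trace_value → Pre_parse_trace_info trace_value → Spec_parse_trace_info trace_value (parse_trace_info trace_value)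

-- ===== LEMMAS AND PROOFS =====

theorem pvLastValue_nil (key : String) : pvLastValue [] key = none := rfl

theorem pvLastValue_cons (e : String) (rest : List String) (key : String) :
    pvLastValue (e :: rest) key = (pvLastValue rest key).or (pvMatchKV key e) := by
  unfold pvLastValue
  rw [List.reverse_cons, List.findSome?_append]
  cases rest.reverse.findSome? (pvMatchKV key) with
  | none => simp [List.findSome?]; cases pvMatchKV key e <;> rfl
  | some v => simp

-- a well-formed step of A, expressed through B's per-entry matcher
theorem pvStepA_eq (st : Option String × Option String × Option String) (e : String)
    (he : (pvSplit e "=").length = 2) :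
    pvStepA st e = ((pvMatchKV "Root" e).or st.1, (pvMatchKV "Parent" e).or st.2.1,
      (pvMatchKV "Sampled" e).or st.2.2) := by
  obtain ⟨k, v, hkv⟩ : ∃ k v, pvSplit e "=" = [k, v] := by
    match hs : pvSplit e "=" with
    | [k, v] => exact ⟨k, v, rfl⟩
    | [] => simp [hs] at he
    | [_] => simp [hs] at he
    | _ :: _ :: _ :: _ => simp [hs] at he
  simp only [pvStepA, pvMatchKV, hkv]
  by_cases h1 : k = "Sampled"
  · subst h1; simp
  · by_cases h2 : k = "Root"
    · subst h2; simp
    · by_cases h3 : k = "Parent"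
      · subst h3; simp
      · simp [h1, h2, h3]

-- loop invariant: A's fold from st equals B's three backward searches merged onto st
theorem pv_loop_eq (entries : List String) (st : Option String × Option String × Option String)
    (h : ∀ e ∈ entries, (pvSplit e "=").length = 2) :
    entries.foldl pvStepA st =
      ((pvLastValue entries "Root").or st.1, (pvLastValue entries "Parent").or st.2.1,
        (pvLastValue entries "Sampled").or st.2.2) := by
  induction entries generalizing st with
  | nil => simp [pvLastValue_nil]
  | cons e rest ih =>
      have he := h e (by simp)
      have hrest : ∀ x ∈ rest, (pvSplit x "=").length = 2 := fun x hx => h x (by simp [hx])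
      rw [List.foldl_cons, ih _ hrest, pvStepA_eq st e he]
      simp [pvLastValue_cons, Option.or_assoc]

-- ===== VERDICT (by name: the statement is the Claim_ definition above) =====
theorem parse_trace_info_spec : Claim_equal_parse_trace_info := by
  intro tv _ hpre
  unfold Spec_parse_trace_info
  match tv with
  | none => rfl
  | some s =>
      unfold Pre_parse_trace_info at hpre
      by_cases hs : s = ""
      · simp [parse_trace_info, parse_trace_info_alt, hs]
      · have hall : ∀ e ∈ pvSplit s ";", (pvSplit e "=").length = 2 := by
          simp only [hs, List.all_eq_true, beq_iff_eq, Bool.or_eq_true] at hpre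
          rcases hpre with h | h
          · exact h.elim
          · exact fun e he => h e he
        simp only [parse_trace_info, parse_trace_info_alt, hs, if_false]
        rw [pv_loop_eq _ _ hall]
        simp
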